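-- pv_equiv track=rewrite | github.com/yogabbagabb/Potato_Tomato_Sweetcorn | Potato/predictionCode/formulaMaker.py | addFixedEffects_excl
-- ===== SOURCE A (Python) =====
-- def addFixedEffects_excl(desiredComponents, formulaString=""):
--     '''
--     Using only months months from may to august, create strings for certain
--     predictors for use in model with fixed effects. Do NOT add linear terms
--     if we desire a quadratic effect.
--
--     param desiredComponents: The fixed effect predictors that we wish to use. See
--     terminology for an explanation of what I mean by "predictors."
--
--     param formulaString: A model configuration string that is being added to by this
--     function.
--
--     return: The concatenation of strings needed to express desiredComponents with
--     formulaString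
--     '''
--     theLength = len(desiredComponents)
--     for counter, component in enumerate(desiredComponents):
--         if component == "TAVE":
--             formulaString += "tave5 +  tave6 +  tave7 +  tave8"
--         if component == "TAVE2":
--             formulaString += "I(tave5^2) + I(tave6^2) + I(tave7^2) + I(tave8^2)"
--         if component == "VPD":
--             formulaString += "vpdave5 +  vpdave6 +  vpdave7 +  vpdave8"
--         if component == "VPD2":
--             formulaString += "I(vpdave5^2) + I(vpdave6^2) + I(vpdave7^2) + I(vpdave8^2)"
--         if component == "PRECIP":
--             formulaString += "precip5 +  precip6 +  precip7 +  precip8"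
--         if component == "PRECIP2":
--             formulaString += "I(precip5^2) + I(precip6^2) + I(precip7^2) + I(precip8^2)"
--         if component == "FIPS":
--             formulaString += "FIPS"
--         if counter != (theLength -1):
--             formulaString += " + "
--     return formulaString
-- ===== SOURCE B (Python) =====
-- _BASES = {"TAVE": "tave", "VPD": "vpdave", "PRECIP": "precip"}
--
--
-- def _fragment(component):
--     # Generate the month-5..8 fragment from its base name instead of hard-coding it.
--     if component == "FIPS":
--         return "FIPS"
--     if component in _BASES:
--         base = _BASES[component]
--         return " +  ".join("%s%d" % (base, m) for m in range(5, 9))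
--     if component.endswith("2") and component[:-1] in _BASES:
--         base = _BASES[component[:-1]]
--         return " + ".join("I(%s%d^2)" % (base, m) for m in range(5, 9))
--     return ""
--
--
-- def addFixedEffects_excl(desiredComponents, formulaString=""):
--     pieces = "".join(_fragment(c) + " + " for c in desiredComponents)
--     if desiredComponents:
--         pieces = pieces[:-3]
--     return formulaString + pieces
-- ===== Notes on version B (the rewrite author's own statement) =====
-- stated objective: alternative
-- what changed: B generates each month-5..8 fragment programmatically from a three-entry base-name table (a '2' suffix selects the quadratic pattern), concatenates fragment+' + ' for every component in one pass, and strips the single trailing separator at the end, instead of A's seven hard-coded if-branches and per-iteration counter-vs-length separator test.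
import Mathlib
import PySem

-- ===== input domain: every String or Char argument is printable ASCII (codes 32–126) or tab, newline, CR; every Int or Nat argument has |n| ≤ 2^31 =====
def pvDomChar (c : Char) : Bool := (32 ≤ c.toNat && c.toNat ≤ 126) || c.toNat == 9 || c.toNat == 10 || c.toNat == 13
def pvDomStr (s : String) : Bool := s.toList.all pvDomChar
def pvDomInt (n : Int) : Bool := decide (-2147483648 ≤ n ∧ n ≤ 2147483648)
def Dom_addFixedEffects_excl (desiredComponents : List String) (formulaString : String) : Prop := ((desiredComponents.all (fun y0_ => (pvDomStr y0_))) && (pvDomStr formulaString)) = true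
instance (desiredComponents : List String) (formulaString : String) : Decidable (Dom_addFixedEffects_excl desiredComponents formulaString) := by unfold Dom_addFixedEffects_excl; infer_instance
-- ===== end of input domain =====

-- B generates each month-5..8 fragment programmatically from a base-name table (a '2' suffix on a
-- base name selects the quadratic pattern), appends fragment + " + " for every component in one
-- pass, and strips the trailing separator once at the end — an alternative decomposition to A's
-- hard-coded if-chain with a counter-based separator test (same cost).

-- ===== PORT A =====
-- A's loop body: sequential independent ifs, then the counter-vs-length separator check
def pvStepA (theLength : Int) (f : String) (p : Int × String) : String :=
  let f := if p.2 = "TAVE" then f ++ "tave5 +  tave6 +  tave7 +  tave8" else f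
  let f := if p.2 = "TAVE2" then f ++ "I(tave5^2) + I(tave6^2) + I(tave7^2) + I(tave8^2)" else f
  let f := if p.2 = "VPD" then f ++ "vpdave5 +  vpdave6 +  vpdave7 +  vpdave8" else f
  let f := if p.2 = "VPD2" then f ++ "I(vpdave5^2) + I(vpdave6^2) + I(vpdave7^2) + I(vpdave8^2)" else f
  let f := if p.2 = "PRECIP" then f ++ "precip5 +  precip6 +  precip7 +  precip8" else f
  let f := if p.2 = "PRECIP2" then f ++ "I(precip5^2) + I(precip6^2) + I(precip7^2) + I(precip8^2)" else f
  let f := if p.2 = "FIPS" then f ++ "FIPS" else f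
  if p.1 ≠ theLength - 1 then f ++ " + " else f

def addFixedEffects_excl (desiredComponents : List String) (formulaString : String) : String :=
  let theLength : Int := desiredComponents.length
  (PySem.List.enumerate desiredComponents).foldl (pvStepA theLength) formulaString

-- ===== PORT B =====
def pvBases : PySem.Dict String String :=
  PySem.Dict.ofList [("TAVE", "tave"), ("VPD", "vpdave"), ("PRECIP", "precip")]

-- Source B's _fragment: generate the month-5..8 fragment from the base name
def pvFragment (component : String) : String :=
  if component = "FIPS" then "FIPS"
  else if pvBases.contains component then
    let base := pvBases.getD component ""
    PySem.Str.join " +  " ((PySem.List.pyRange 5 9 1).map (fun m => base ++ PySem.Int.toStr m))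
  else if PySem.Str.endswith component "2" &&
          pvBases.contains (PySem.Str.slice component none (some (-1))) then
    let base := pvBases.getD (PySem.Str.slice component none (some (-1))) ""
    PySem.Str.join " + " ((PySem.List.pyRange 5 9 1).map (fun m => "I(" ++ base ++ PySem.Int.toStr m ++ "^2)"))
  else ""

def addFixedEffects_excl_alt (desiredComponents : List String) (formulaString : String) : String :=
  let pieces := PySem.Str.join "" (desiredComponents.map (fun c => pvFragment c ++ " + "))
  let pieces := if desiredComponents ≠ [] then PySem.Str.slice pieces none (some (-3)) else pieces
  formulaString ++ pieces

-- ===== PRECONDITION & SPEC =====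
def Spec_addFixedEffects_excl (desiredComponents : List String) (formulaString : String) (out : String) : Prop := out = addFixedEffects_excl_alt desiredComponents formulaString
instance (desiredComponents : List String) (formulaString : String) (out : String) : Decidable (Spec_addFixedEffects_excl desiredComponents formulaString out) := by unfold Spec_addFixedEffects_excl; infer_instance

-- ===== CLAIM (what is proved, stated in full; the proofs are below) =====
def Claim_equal_addFixedEffects_excl : Prop := ∀ (desiredComponents : List String) (formulaString : String), Dom_addFixedEffects_excl desiredComponents formulaString → Spec_addFixedEffects_excl desiredComponents formulaString (addFixedEffects_excl desiredComponents formulaString)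

-- ===== LEMMAS AND PROOFS =====

-- a string that ends in "2" and whose [:-1] slice is b is b ++ "2"
theorem pvEnds2 (c b : String) (h2 : PySem.Str.endswith c "2" = true)
    (hd : (PySem.Str.slice c none (some (-1))).toList = b.toList) : c = b ++ "2" := by
  have hsuf : "2".toList <:+ c.toList := by
    simpa [PySem.Chars.endswith_iff] using h2
  obtain ⟨t, ht⟩ := hsuf
  have h2l : "2".toList = ['2'] := rfl
  rw [PySem.Str.slice_to_neg_one, ← ht, h2l, List.dropLast_concat] at hd
  have : c.toList = (b ++ "2").toList := by
    rw [← ht, hd]; simp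
  exact String.toList_inj.mp this

-- pvFragment is "" off the seven component names
theorem pvFragment_other (c : String)
    (h1 : c ≠ "TAVE") (h2 : c ≠ "TAVE2") (h3 : c ≠ "VPD") (h4 : c ≠ "VPD2")
    (h5 : c ≠ "PRECIP") (h6 : c ≠ "PRECIP2") (h7 : c ≠ "FIPS") : pvFragment c = "" := by
  have hk : pvBases.keys = ["TAVE", "VPD", "PRECIP"] := by decide
  have hc : pvBases.contains c = false := by
    rw [PySem.Dict.contains_eq_decide_mem_keys, hk]
    simp [h1, h3, h5]
  have hc2 : (PySem.Str.endswith c "2" &&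
      pvBases.contains (PySem.Str.slice c none (some (-1)))) = false := by
    by_cases he : PySem.Str.endswith c "2" = true
    · rw [PySem.Dict.contains_eq_decide_mem_keys, hk]
      by_contra h
      simp only [he, Bool.true_and, Bool.not_eq_false, decide_eq_true_eq,
        List.mem_cons, List.not_mem_nil, or_false] at h
      rcases h with h | h | h <;>
        [exact h2 (pvEnds2 c "TAVE" he (by rw [h]));
         exact h4 (pvEnds2 c "VPD" he (by rw [h]));
         exact h6 (pvEnds2 c "PRECIP" he (by rw [h]))]
    · have he' : PySem.Str.endswith c "2" = false := by
        revert he; cases PySem.Str.endswith c "2" <;> simp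
      rw [he', Bool.false_and]
  unfold pvFragment
  rw [if_neg h7,
      if_neg (fun h => Bool.false_ne_true (hc ▸ h)),
      if_neg (fun h => Bool.false_ne_true (hc2 ▸ h))]

-- one step of A's loop appends exactly B's fragment, plus the separator when not last
theorem pvStepA_eq (n k : Int) (f c : String) :
    pvStepA n f (k, c) =
      if k ≠ n - 1 then (f ++ pvFragment c) ++ " + " else f ++ pvFragment c := by
  unfold pvStepA
  by_cases h1 : c = "TAVE"
  · subst h1; simp [show pvFragment "TAVE" = "tave5 +  tave6 +  tave7 +  tave8" from by decide]
  by_cases h2 : c = "TAVE2"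
  · subst h2; simp [show pvFragment "TAVE2" = "I(tave5^2) + I(tave6^2) + I(tave7^2) + I(tave8^2)" from by decide]
  by_cases h3 : c = "VPD"
  · subst h3; simp [show pvFragment "VPD" = "vpdave5 +  vpdave6 +  vpdave7 +  vpdave8" from by decide]
  by_cases h4 : c = "VPD2"
  · subst h4; simp [show pvFragment "VPD2" = "I(vpdave5^2) + I(vpdave6^2) + I(vpdave7^2) + I(vpdave8^2)" from by decide]
  by_cases h5 : c = "PRECIP"
  · subst h5; simp [show pvFragment "PRECIP" = "precip5 +  precip6 +  precip7 +  precip8" from by decide]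
  by_cases h6 : c = "PRECIP2"
  · subst h6; simp [show pvFragment "PRECIP2" = "I(precip5^2) + I(precip6^2) + I(precip7^2) + I(precip8^2)" from by decide]
  by_cases h7 : c = "FIPS"
  · subst h7; simp [show pvFragment "FIPS" = "FIPS" from by decide]
  simp [h1, h2, h3, h4, h5, h6, h7, pvFragment_other c h1 h2 h3 h4 h5 h6 h7]

-- the " + "-separated joint of the fragments, recursively (proof helper)
def pvJ : List String → String
  | [] => ""
  | [c] => pvFragment c
  | c :: c' :: t => pvFragment c ++ " + " ++ pvJ (c' :: t)

theorem pvLoop_eq (n : Int) (l : List String) : ∀ (k : Int), k + l.length = n → ∀ (f : String),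
    (PySem.List.enumerate l k).foldl (pvStepA n) f = f ++ pvJ l := by
  induction l with
  | nil => intro k hk f; simp [PySem.List.enumerate, pvJ]
  | cons c t ih =>
    intro k hk f
    rw [PySem.List.enumerate_cons, List.foldl_cons, pvStepA_eq]
    cases t with
    | nil =>
      have hk' : k = n - 1 := by simp at hk; omega
      simp [hk', PySem.List.enumerate, pvJ]
    | cons c2 t2 =>
      have hk' : k ≠ n - 1 := by simp at hk; omega
      rw [if_pos hk', ih (k + 1) (by simp at hk ⊢; omega)]
      show _ = f ++ (pvFragment c ++ " + " ++ pvJ (c2 :: t2))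
      simp [String.append_assoc]

theorem pvJoin_cons (a : String) (r : List String) :
    PySem.Str.join "" (a :: r) = a ++ PySem.Str.join "" r := by
  cases r with
  | nil => simp [PySem.Str.join, PySem.Chars.join_singleton, PySem.Chars.join_nil]
  | cons b r' => simp [PySem.Str.join, PySem.Chars.join_cons_cons]

-- B's unstripped concatenation is pvJ followed by one trailing separator
theorem pvJoin_pieces (c : String) (t : List String) :
    PySem.Str.join "" ((c :: t).map (fun x => pvFragment x ++ " + ")) = pvJ (c :: t) ++ " + " := by
  induction t generalizing c with
  | nil => simp [pvJ, PySem.Str.join, PySem.Chars.join_singleton]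
  | cons c2 t2 ih =>
    rw [List.map_cons, pvJoin_cons, ih c2]
    show _ = (pvFragment c ++ " + " ++ pvJ (c2 :: t2)) ++ " + "
    simp [String.append_assoc]

-- stripping the last three characters removes exactly the trailing " + "
theorem pvChop (J : String) :
    PySem.Str.slice (J ++ " + ") none (some (-3)) = J := by
  apply String.toList_inj.mp
  have h : (J ++ " + ").toList = J.toList ++ [' ', '+', ' '] := by simp
  rw [PySem.Str.toList_slice, PySem.Chars.slice_eq_listSlice, h,
      PySem.List.slice_to_neg_ofNat _ 3 (by omega)]
  simp

theorem pvAlt_eq (l : List String) (f : String) :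
    addFixedEffects_excl_alt l f = f ++ pvJ l := by
  unfold addFixedEffects_excl_alt
  cases l with
  | nil => simp [pvJ, PySem.Str.join, PySem.Chars.join_nil]
  | cons c t =>
    simp only [ne_eq, reduceCtorEq, not_false_iff, if_true, List.map_cons]
    have h := pvJoin_pieces c t
    simp only [List.map_cons] at h
    rw [h, pvChop]

-- ===== VERDICT (by name: the statement is the Claim_ definition above) =====
theorem addFixedEffects_excl_spec : Claim_equal_addFixedEffects_excl := by
  intro dc fs _
  unfold Spec_addFixedEffects_excl addFixedEffects_excl
  rw [pvAlt_eq]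
  exact pvLoop_eq dc.length dc 0 (by simp) fs
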